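-- pv_equiv track=rewrite | github.com/ariffazil/arifos-geox | arifOS-model-registry/soul_merger.py | _infer_structure
-- ===== SOURCE A (Python) =====
-- def _infer_structure(comm_style: list[str]) -> str:
--     """Infer communication structure from traits."""
--     if not comm_style:
--         return "unknown"
--     if any(s in comm_style for s in ["structured", "clear_section_headers", "numbered_lists"]):
--         return "structured"
--     if any(s in comm_style for s in ["prose_first", "nuanced_caveats", "thoughtful"]):
--         return "prose_first"
--     if any(
--         s in comm_style for s in ["direct_sarcasm", "conversational_directness", "direct_answers"]
--     ):
--         return "direct"
--     return "balanced"
-- ===== SOURCE B (Python) =====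
-- _CATEGORY = {
--     "structured": "structured",
--     "clear_section_headers": "structured",
--     "numbered_lists": "structured",
--     "prose_first": "prose_first",
--     "nuanced_caveats": "prose_first",
--     "thoughtful": "prose_first",
--     "direct_sarcasm": "direct",
--     "conversational_directness": "direct",
--     "direct_answers": "direct",
-- }
--
--
-- def _infer_structure(comm_style: list[str]) -> str:
--     """Infer communication structure from traits (single pass + priority resolution)."""
--     if not comm_style:
--         return "unknown"
--     matched = set()
--     for trait in comm_style:
--         cat = _CATEGORY.get(trait)
--         if cat is not None:
--             matched.add(cat)
--     for cat in ("structured", "prose_first", "direct"):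
--         if cat in matched:
--             return cat
--     return "balanced"
-- ===== Notes on version B (the rewrite author's own statement) =====
-- stated objective: idiomatic
-- what changed: Replaced three separate membership scans over fixed trait lists with a reverse-lookup trait-to-category dict, one pass over comm_style collecting matched categories into a set, and a priority-order resolution.
import Mathlib
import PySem

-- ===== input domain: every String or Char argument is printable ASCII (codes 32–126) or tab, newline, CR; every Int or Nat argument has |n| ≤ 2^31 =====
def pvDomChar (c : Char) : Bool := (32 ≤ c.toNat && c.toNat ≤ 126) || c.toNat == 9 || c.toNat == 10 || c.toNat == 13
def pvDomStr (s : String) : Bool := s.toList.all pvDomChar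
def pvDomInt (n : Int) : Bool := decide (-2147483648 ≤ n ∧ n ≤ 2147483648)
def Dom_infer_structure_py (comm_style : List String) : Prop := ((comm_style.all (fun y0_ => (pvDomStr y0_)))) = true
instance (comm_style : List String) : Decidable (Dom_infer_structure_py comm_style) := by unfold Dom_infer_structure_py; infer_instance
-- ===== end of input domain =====

-- B replaces A's three fixed-trait scans with a trait→category dict, one pass collecting matched categories into a set, and a priority resolution (idiomatic, same cost).

-- ===== PORT A =====
def infer_structure_py (comm_style : List String) : String :=
  if comm_style = [] then "unknown"
  else if (["structured", "clear_section_headers", "numbered_lists"].any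
      (fun s => comm_style.contains s)) then "structured"
  else if (["prose_first", "nuanced_caveats", "thoughtful"].any
      (fun s => comm_style.contains s)) then "prose_first"
  else if (["direct_sarcasm", "conversational_directness", "direct_answers"].any
      (fun s => comm_style.contains s)) then "direct"
  else "balanced"

-- ===== PORT B =====
def pvCategory : PySem.Dict String String :=
  PySem.Dict.mk [("structured", "structured"),
   ("clear_section_headers", "structured"),
   ("numbered_lists", "structured"),
   ("prose_first", "prose_first"),
   ("nuanced_caveats", "prose_first"),
   ("thoughtful", "prose_first"),
   ("direct_sarcasm", "direct"),
   ("conversational_directness", "direct"),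
   ("direct_answers", "direct")]

def infer_structure_py_alt (comm_style : List String) : String :=
  if comm_style = [] then "unknown"
  else
    let matched : PySem.Set String :=
      comm_style.foldl
        (fun s trait =>
          match PySem.Dict.get? pvCategory trait with
          | some cat => PySem.Set.add s cat
          | none => s)
        PySem.Set.empty
    match ["structured", "prose_first", "direct"].find?
        (fun cat => PySem.Set.contains matched cat) with
    | some cat => cat
    | none => "balanced"

-- ===== PRECONDITION & SPEC =====
def Spec_infer_structure_py (comm_style : List String) (out : String) : Prop := out = infer_structure_py_alt comm_style
instance (comm_style : List String) (out : String) : Decidable (Spec_infer_structure_py comm_style out) := by unfold Spec_infer_structure_py; infer_instance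

-- ===== CLAIM (what is proved, stated in full; the proofs are below) =====
def Claim_equal_infer_structure_py : Prop := ∀ (comm_style : List String), Dom_infer_structure_py comm_style → Spec_infer_structure_py comm_style (infer_structure_py comm_style)

-- ===== LEMMAS AND PROOFS =====

-- membership in the set built by B's fold
theorem mem_fold_matched (l : List String) (acc : PySem.Set String) (c : String) :
    c ∈ l.foldl
        (fun s trait =>
          match PySem.Dict.get? pvCategory trait with
          | some cat => PySem.Set.add s cat
          | none => s)
        acc ↔ c ∈ acc ∨ ∃ t ∈ l, PySem.Dict.get? pvCategory t = some c := by
  induction l generalizing acc with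
  | nil => simp
  | cons hd tl ih =>
    simp only [List.foldl_cons, ih]
    cases h : PySem.Dict.get? pvCategory hd with
    | none =>
      simp only [List.mem_cons]
      constructor
      · rintro (ha | ⟨t, ht, hc⟩)
        · exact Or.inl ha
        · exact Or.inr ⟨t, Or.inr ht, hc⟩
      · rintro (ha | ⟨t, (rfl | ht), hc⟩)
        · exact Or.inl ha
        · rw [h] at hc; exact absurd hc (by simp)
        · exact Or.inr ⟨t, ht, hc⟩
    | some cat =>
      rw [PySem.Set.mem_add]
      simp only [List.mem_cons]
      constructor
      · rintro ((ha | rfl) | ⟨t, ht, hc⟩)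
        · exact Or.inl ha
        · exact Or.inr ⟨hd, Or.inl rfl, h⟩
        · exact Or.inr ⟨t, Or.inr ht, hc⟩
      · rintro (ha | ⟨t, (rfl | ht), hc⟩)
        · exact Or.inl (Or.inl ha)
        · rw [h] at hc; exact Or.inl (Or.inr (Option.some_injective _ hc).symm)
        · exact Or.inr ⟨t, ht, hc⟩

-- which traits the dict maps to each category
theorem get_pvCategory (t c : String) :
    PySem.Dict.get? pvCategory t = some c ↔
      (c = "structured" ∧ (t = "structured" ∨ t = "clear_section_headers" ∨ t = "numbered_lists")) ∨
      (c = "prose_first" ∧ (t = "prose_first" ∨ t = "nuanced_caveats" ∨ t = "thoughtful")) ∨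
      (c = "direct" ∧ (t = "direct_sarcasm" ∨ t = "conversational_directness" ∨ t = "direct_answers")) := by
  simp only [pvCategory, PySem.Dict.get?_mk_cons]
  by_cases h1 : t = "structured" <;> by_cases h2 : t = "clear_section_headers" <;>
    by_cases h3 : t = "numbered_lists" <;> by_cases h4 : t = "prose_first" <;>
    by_cases h5 : t = "nuanced_caveats" <;> by_cases h6 : t = "thoughtful" <;>
    by_cases h7 : t = "direct_sarcasm" <;> by_cases h8 : t = "conversational_directness" <;>
    by_cases h9 : t = "direct_answers" <;>
    simp_all <;>
    first
      | exact eq_comm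
      | (simp [PySem.Dict.get?, Ne.symm h1, Ne.symm h2, Ne.symm h3, Ne.symm h4, Ne.symm h5,
          Ne.symm h6, Ne.symm h7, Ne.symm h8, Ne.symm h9])

-- ===== VERDICT (by name: the statement is the Claim_ definition above) =====
theorem infer_structure_py_spec : Claim_equal_infer_structure_py := by
  intro comm_style _
  unfold Spec_infer_structure_py infer_structure_py infer_structure_py_alt
  by_cases hnil : comm_style = []
  · simp [hnil]
  · simp only [if_neg hnil]
    have hmem : ∀ c : String,
        (PySem.Set.contains
          (comm_style.foldl
            (fun s trait =>
              match PySem.Dict.get? pvCategory trait with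
              | some cat => PySem.Set.add s cat
              | none => s)
            PySem.Set.empty) c) = true ↔
          ∃ t ∈ comm_style, PySem.Dict.get? pvCategory t = some c := by
      intro c
      rw [show ∀ (s : PySem.Set String), PySem.Set.contains s c = List.contains s c from fun _ => rfl]
      rw [List.contains_iff_mem]
      rw [mem_fold_matched]
      simp [PySem.Set.empty]
    by_cases b1 : ("structured" ∈ comm_style ∨ "clear_section_headers" ∈ comm_style ∨ "numbered_lists" ∈ comm_style)
    · have h1 : ∃ t ∈ comm_style, PySem.Dict.get? pvCategory t = some "structured" := by
        rcases b1 with h | h | h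
        · exact ⟨_, h, by rw [get_pvCategory]; tauto⟩
        · exact ⟨_, h, by rw [get_pvCategory]; tauto⟩
        · exact ⟨_, h, by rw [get_pvCategory]; tauto⟩
      rw [if_pos (by simpa [List.any, List.contains_iff_mem] using b1)]
      simp only [List.find?]
      rw [(hmem "structured").mpr h1]
    · have h1 : ¬ ∃ t ∈ comm_style, PySem.Dict.get? pvCategory t = some "structured" := by
        rintro ⟨t, ht, hc⟩
        rw [get_pvCategory] at hc
        rcases hc with ⟨_, h⟩ | ⟨h, _⟩ | ⟨h, _⟩
        · rcases h with rfl | rfl | rfl <;> tauto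
        · simp_all
        · simp_all
      rw [if_neg (by simpa [List.any, List.contains_iff_mem] using b1)]
      simp only [List.find?]
      rw [Bool.eq_false_iff.mpr (fun h => h1 ((hmem "structured").mp h))]
      by_cases b2 : ("prose_first" ∈ comm_style ∨ "nuanced_caveats" ∈ comm_style ∨ "thoughtful" ∈ comm_style)
      · have h2 : ∃ t ∈ comm_style, PySem.Dict.get? pvCategory t = some "prose_first" := by
          rcases b2 with h | h | h
          · exact ⟨_, h, by rw [get_pvCategory]; tauto⟩
          · exact ⟨_, h, by rw [get_pvCategory]; tauto⟩
          · exact ⟨_, h, by rw [get_pvCategory]; tauto⟩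
        rw [if_pos (by simpa [List.any, List.contains_iff_mem] using b2)]
        simp only [(hmem "prose_first").mpr h2]
      · have h2 : ¬ ∃ t ∈ comm_style, PySem.Dict.get? pvCategory t = some "prose_first" := by
          rintro ⟨t, ht, hc⟩
          rw [get_pvCategory] at hc
          rcases hc with ⟨h, _⟩ | ⟨_, h⟩ | ⟨h, _⟩
          · simp_all
          · rcases h with rfl | rfl | rfl <;> tauto
          · simp_all
        rw [if_neg (by simpa [List.any, List.contains_iff_mem] using b2)]
        rw [Bool.eq_false_iff.mpr (fun h => h2 ((hmem "prose_first").mp h))]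
        by_cases b3 : ("direct_sarcasm" ∈ comm_style ∨ "conversational_directness" ∈ comm_style ∨ "direct_answers" ∈ comm_style)
        · have h3 : ∃ t ∈ comm_style, PySem.Dict.get? pvCategory t = some "direct" := by
            rcases b3 with h | h | h
            · exact ⟨_, h, by rw [get_pvCategory]; tauto⟩
            · exact ⟨_, h, by rw [get_pvCategory]; tauto⟩
            · exact ⟨_, h, by rw [get_pvCategory]; tauto⟩
          rw [if_pos (by simpa [List.any, List.contains_iff_mem] using b3)]
          simp only [(hmem "direct").mpr h3]
        · have h3 : ¬ ∃ t ∈ comm_style, PySem.Dict.get? pvCategory t = some "direct" := by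
            rintro ⟨t, ht, hc⟩
            rw [get_pvCategory] at hc
            rcases hc with ⟨h, _⟩ | ⟨h, _⟩ | ⟨_, h⟩
            · simp_all
            · simp_all
            · rcases h with rfl | rfl | rfl <;> tauto
          rw [if_neg (by simpa [List.any, List.contains_iff_mem] using b3)]
          rw [Bool.eq_false_iff.mpr (fun h => h3 ((hmem "direct").mp h))]
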